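-- pv_equiv track=rewrite | github.com/Taucari/nTeamEloBalancer | test1.py | detect_level_completion_flags
-- ===== SOURCE A (Python) =====
-- def detect_level_completion_flags(checking):
--     list_of_dicts = [*checking.values()]
--     if all(value['completion_flag'] for value in list_of_dicts):
--         return True, len(list_of_dicts) - 1
--     else:
--         for i in range(len(list_of_dicts)):
--             if not list_of_dicts[i]['completion_flag']:
--                 return False, i
-- ===== SOURCE B (Python) =====
-- def detect_level_completion_flags(checking):
--     i = 0
--     for value in checking.values():
--         if not value['completion_flag']:
--             return False, i
--         i += 1
--     return True, i - 1
-- ===== Notes on version B (the rewrite author's own statement) =====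
-- stated objective: simpler
-- what changed: Replaces A's two sequential scans (an all() pre-scan plus an index-based re-scan for the first falsy flag) with one fused pass that keeps a running index and early-returns at the first incomplete entry.
import Mathlib
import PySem

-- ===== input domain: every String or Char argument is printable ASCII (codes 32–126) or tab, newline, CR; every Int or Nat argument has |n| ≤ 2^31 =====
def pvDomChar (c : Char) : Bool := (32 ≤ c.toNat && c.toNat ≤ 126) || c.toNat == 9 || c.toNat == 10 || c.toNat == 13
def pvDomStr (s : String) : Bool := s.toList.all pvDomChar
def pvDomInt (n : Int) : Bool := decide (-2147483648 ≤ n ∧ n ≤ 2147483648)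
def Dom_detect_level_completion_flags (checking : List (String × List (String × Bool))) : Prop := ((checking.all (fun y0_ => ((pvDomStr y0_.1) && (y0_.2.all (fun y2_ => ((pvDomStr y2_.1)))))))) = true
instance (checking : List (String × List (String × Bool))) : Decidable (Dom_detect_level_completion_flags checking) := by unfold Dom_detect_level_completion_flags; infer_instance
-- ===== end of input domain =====

-- B fuses A's all() pre-scan and index re-scan into one early-returning pass (objective: simpler).

-- ===== PORT A =====
-- shared lookup: value['completion_flag'] as an Option (none = KeyError, excluded by Pre_)
def pvFlag (d : List (String × Bool)) : Option Bool :=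
  (PySem.Dict.ofList d).get? "completion_flag"

-- A's else-branch: 'for i in range(len(list_of_dicts)): if not …: return False, i'
-- (the fall-through (false, 0) is unreachable: the branch runs only when some flag is falsy)
def pvALoop (ds : List (List (String × Bool))) (i : Nat) : Bool × Int :=
  if h : i < ds.length then
    if ((pvFlag ds[i]).getD false) = false then (false, (i : Int))
    else pvALoop ds (i + 1)
  else (false, 0)
termination_by ds.length - i

def detect_level_completion_flags (checking : List (String × List (String × Bool))) : Bool × Int :=
  let list_of_dicts := (PySem.Dict.ofList checking).values
  if list_of_dicts.all (fun d => (pvFlag d).getD false) then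
    (true, (list_of_dicts.length : Int) - 1)
  else
    pvALoop list_of_dicts 0

-- ===== PORT B =====
-- B's single loop: running counter i, early return at first falsy flag, (True, i-1) at the end
def pvBLoop : List (List (String × Bool)) → Int → Bool × Int
  | [], i => (true, i - 1)
  | d :: rest, i =>
    if ((pvFlag d).getD false) = false then (false, i) else pvBLoop rest (i + 1)

def detect_level_completion_flags_alt (checking : List (String × List (String × Bool))) : Bool × Int :=
  pvBLoop (PySem.Dict.ofList checking).values 0

-- ===== PRECONDITION & SPEC =====
-- Pre_ excludes exactly the inputs where Python A raises KeyError: some value dict reached by the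
-- scan (i.e. preceded only by present-and-true flags) is missing the 'completion_flag' key.
def Pre_detect_level_completion_flags (checking : List (String × List (String × Bool))) : Prop :=
  let ds := (PySem.Dict.ofList checking).values
  ∀ i, i < ds.length → (∀ j, j < i → pvFlag (ds.getD j []) = some true) → pvFlag (ds.getD i []) ≠ none
instance (checking : List (String × List (String × Bool))) : Decidable (Pre_detect_level_completion_flags checking) := by unfold Pre_detect_level_completion_flags; infer_instance

def pvWitness_detect_level_completion_flags : (List (String × List (String × Bool))) :=
  [("a", [("completion_flag", true)]), ("b", [("completion_flag", false)])]

def Spec_detect_level_completion_flags (checking : List (String × List (String × Bool))) (out : Bool × Int) : Prop := out = detect_level_completion_flags_alt checking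
instance (checking : List (String × List (String × Bool))) (out : Bool × Int) : Decidable (Spec_detect_level_completion_flags checking out) := by unfold Spec_detect_level_completion_flags; infer_instance

-- ===== CLAIM (what is proved, stated in full; the proofs are below) =====
def Claim_equal_detect_level_completion_flags : Prop := ∀ (checking : List (String × List (String × Bool))), Dom_detect_level_completion_flags checking → Pre_detect_level_completion_flags checking → Spec_detect_level_completion_flags checking (detect_level_completion_flags checking)

-- ===== LEMMAS AND PROOFS =====

-- when every flag is (present and) truthy, B's loop falls through to (True, i + len - 1)
lemma pvBLoop_all_true (ds : List (List (String × Bool))) (i : Int)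
    (h : ds.all (fun d => (pvFlag d).getD false) = true) :
    pvBLoop ds i = (true, i + (ds.length : Int) - 1) := by
  induction ds generalizing i with
  | nil => simp [pvBLoop]
  | cons d rest ih =>
    simp only [List.all_cons, Bool.and_eq_true] at h
    rw [pvBLoop, if_neg (by simp [h.1]), ih _ h.2]
    simp only [List.length_cons]
    congr 1
    push_cast
    ring

-- A's index loop agrees with B's structural loop on the remaining suffix, as long as a falsy flag remains
lemma pvALoop_eq_pvBLoop (ds : List (List (String × Bool))) :
    ∀ n i, ds.length - i ≤ n →
      (ds.drop i).all (fun d => (pvFlag d).getD false) = false →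
      pvALoop ds i = pvBLoop (ds.drop i) (i : Int) := by
  intro n
  induction n with
  | zero =>
    intro i hle hall
    have hi : ds.length ≤ i := by omega
    rw [List.drop_eq_nil_of_le hi] at hall
    simp at hall
  | succ n ih =>
    intro i hle hall
    have hi : i < ds.length := by
      by_contra hge
      rw [List.drop_eq_nil_of_le (by omega)] at hall
      simp at hall
    have hdrop : ds.drop i = ds[i] :: ds.drop (i + 1) := List.drop_eq_getElem_cons hi
    rw [pvALoop, dif_pos hi, hdrop, pvBLoop]
    by_cases hf : ((pvFlag ds[i]).getD false) = false
    · simp [hf]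
    · rw [if_neg hf, if_neg hf]
      rw [hdrop, List.all_cons] at hall
      have hall' : (ds.drop (i + 1)).all (fun d => (pvFlag d).getD false) = false := by
        cases h1 : (pvFlag ds[i]).getD false
        · exact absurd h1 hf
        · cases h2 : (ds.drop (i + 1)).all (fun d => (pvFlag d).getD false)
          · rfl
          · rw [h1, h2] at hall; simp at hall
      rw [ih (i + 1) (by omega) hall']
      push_cast
      ring_nf

-- ===== VERDICT (by name: the statement is the Claim_ definition above) =====
theorem detect_level_completion_flags_spec : Claim_equal_detect_level_completion_flags := by
  intro checking _ _
  unfold Spec_detect_level_completion_flags detect_level_completion_flags detect_level_completion_flags_alt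
  set ds := (PySem.Dict.ofList checking).values with hds
  by_cases hall : ds.all (fun d => (pvFlag d).getD false) = true
  · rw [if_pos hall, pvBLoop_all_true ds 0 hall]
    simp
  · rw [if_neg hall]
    have hall' : ds.all (fun d => (pvFlag d).getD false) = false := by
      cases h : ds.all (fun d => (pvFlag d).getD false)
      · rfl
      · exact absurd h hall
    have := pvALoop_eq_pvBLoop ds ds.length 0 (by omega) (by rw [List.drop_zero]; exact hall')
    rw [List.drop_zero] at this
    exact_mod_cast this
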